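-- pv_equiv track=rewrite | github.com/Torato-Taraka/AI_study_record | 社会计算大作业20191224/establish.py | topic_sift
-- ===== SOURCE A (Python) =====
-- def topic_sift(labels):
--     #话题域以及话题域的个数
--     topic_types = []
--     topic_types_number = 0
--     #遍历标签
--     for i in range(len(labels)):
--         #第一个话题或者相邻两个分句话题不同时建立新话题
--         if (i == 0) or (i > 0 and labels[i] != labels[i - 1]) :
--             #新话题的建立
--             topic_types.append(labels[i])
--             topic_types_number += 1
--
--     return topic_types, topic_types_number
-- ===== SOURCE B (Python) =====
-- def topic_sift(labels):
--     # Divide and conquer: collapse each half of labels[lo:hi] recursively,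
--     # then merge, fusing the boundary when the halves' runs touch.
--     def collapse(lo, hi):
--         if hi - lo <= 1:
--             return list(labels[lo:hi])
--         mid = (lo + hi) // 2
--         left = collapse(lo, mid)
--         right = collapse(mid, hi)
--         if left[-1] == right[0]:
--             return left + right[1:]
--         return left + right
--     topic_types = collapse(0, len(labels))
--     return topic_types, len(topic_types)
-- ===== Notes on version B (the rewrite author's own statement) =====
-- stated objective: alternative
-- what changed: Replaces A's linear index scan comparing labels[i] with labels[i-1] by a divide-and-conquer: each half is collapsed recursively and the two collapsed halves are merged, fusing the boundary run when the left half's last label equals the right half's first.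
import Mathlib
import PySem

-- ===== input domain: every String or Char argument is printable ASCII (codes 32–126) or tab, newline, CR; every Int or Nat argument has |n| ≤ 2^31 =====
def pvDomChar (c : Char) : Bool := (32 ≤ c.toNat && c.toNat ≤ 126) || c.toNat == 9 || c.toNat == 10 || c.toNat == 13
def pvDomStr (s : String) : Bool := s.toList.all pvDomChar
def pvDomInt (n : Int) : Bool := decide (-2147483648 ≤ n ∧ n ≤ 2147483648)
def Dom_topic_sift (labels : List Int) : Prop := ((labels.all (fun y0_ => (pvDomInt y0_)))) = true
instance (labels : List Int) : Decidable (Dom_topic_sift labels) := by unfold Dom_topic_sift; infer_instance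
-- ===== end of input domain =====

-- B collapses consecutive duplicate labels by divide-and-conquer (collapse each half,
-- merge fusing the boundary run) instead of A's linear index scan; objective: alternative.


-- ===== PORT A =====
-- Literal port of A: for i in range(len(labels)), append labels[i] and bump the
-- counter when i == 0 or labels[i] != labels[i-1].
def topic_sift (labels : List Int) : List Int × Int :=
  (PySem.List.pyRange 0 labels.length 1).foldl
    (fun (st : List Int × Int) i =>
      if i == 0 || (decide (i > 0) &&
          (PySem.List.pyGetD labels i 0 != PySem.List.pyGetD labels (i - 1) 0)) then
        (st.1 ++ [PySem.List.pyGetD labels i 0], st.2 + 1)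
      else st)
    ([], 0)

-- ===== PORT B =====
-- Source B's boundary merge: 'left + right[1:] if left[-1] == right[0] else left + right'
-- (getLast?/head? make the comparison total; both halves are nonempty in every call).
def pvMerge (L R : List Int) : List Int :=
  match L.getLast?, R.head? with
  | some a, some b => if a = b then L ++ R.tail else L ++ R
  | _, _ => L ++ R

-- Source B's collapse(lo, hi) recursing on the sublist labels[lo:hi]: base case at
-- length ≤ 1, otherwise split at the midpoint and merge the collapsed halves.
def pvDC (xs : List Int) : List Int :=
  if h : xs.length ≤ 1 then xs
  else
    pvMerge (pvDC (xs.take (xs.length / 2))) (pvDC (xs.drop (xs.length / 2)))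
termination_by xs.length
decreasing_by
  · simp only [List.length_take]; omega
  · simp only [List.length_drop]; omega

def topic_sift_alt (labels : List Int) : List Int × Int :=
  let topic_types := pvDC labels
  (topic_types, (topic_types.length : Int))

-- ===== PRECONDITION & SPEC =====
def Spec_topic_sift (labels : List Int) (out : List Int × Int) : Prop := out = topic_sift_alt labels
instance (labels : List Int) (out : List Int × Int) : Decidable (Spec_topic_sift labels out) := by unfold Spec_topic_sift; infer_instance

-- ===== CLAIM (what is proved, stated in full; the proofs are below) =====
def Claim_equal_topic_sift : Prop := ∀ (labels : List Int), Dom_topic_sift labels → Spec_topic_sift labels (topic_sift labels)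

-- ===== LEMMAS AND PROOFS =====

-- Proof-side reference: the left-to-right collapse of consecutive duplicates.
def pvCollapse : List Int → List Int
  | [] => []
  | [a] => [a]
  | a :: b :: rest => if a = b then pvCollapse (b :: rest) else a :: pvCollapse (b :: rest)

theorem pvCollapse_append (ys : List Int) (z : Int) (h : ys ≠ []) :
    pvCollapse (ys ++ [z]) =
      if z = ys.getLast h then pvCollapse ys else pvCollapse ys ++ [z] := by
  induction ys with
  | nil => exact absurd rfl h
  | cons a t ih =>
    cases t with
    | nil =>
      rcases eq_or_ne z a with hz | hz
      · subst hz; simp [pvCollapse, List.getLast]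
      · simp [pvCollapse, List.getLast, hz, Ne.symm hz]
    | cons b r =>
      have ht : (b :: r) ≠ [] := by simp
      have hlast : (a :: b :: r).getLast h = (b :: r).getLast ht := by
        simp [List.getLast]
      simp only [List.cons_append, pvCollapse, hlast]
      split_ifs <;> simp_all

theorem topic_sift_singleton (z : Int) : topic_sift [z] = ([z], 1) := by
  simp [topic_sift, PySem.List.pyRange_one_cons (by norm_num : (0:ℤ) < 1),
    PySem.List.pyRange_one_eq_nil (by norm_num : (1:ℤ) ≤ 1), PySem.List.pyGetD_zero_cons]

theorem topic_sift_eq_collapse (labels : List Int) :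
    topic_sift labels = (pvCollapse labels, ((pvCollapse labels).length : Int)) := by
  induction labels using List.reverseRecOn with
  | nil => decide
  | append_singleton ys z ih =>
    rcases eq_or_ne ys ([] : List Int) with hys | hys
    · subst hys
      simpa [pvCollapse] using topic_sift_singleton z
    have hpos : 0 < ys.length := List.length_pos_iff.mpr hys
    have hlen : ((ys ++ [z]).length : Int) = (ys.length : Int) + 1 := by
      simp
    have hsplit : PySem.List.pyRange 0 ((ys ++ [z]).length : Int) 1 =
        PySem.List.pyRange 0 (ys.length : Int) 1 ++ [(ys.length : Int)] := by
      rw [hlen, PySem.List.pyRange_one_succ_right (by positivity)]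
    have hcongr :
        (PySem.List.pyRange 0 (ys.length : Int) 1).foldl
          (fun (st : List Int × Int) i =>
            if i == 0 || (decide (i > 0) &&
                (PySem.List.pyGetD (ys ++ [z]) i 0 != PySem.List.pyGetD (ys ++ [z]) (i - 1) 0)) then
              (st.1 ++ [PySem.List.pyGetD (ys ++ [z]) i 0], st.2 + 1)
            else st)
          ([], 0) =
        (PySem.List.pyRange 0 (ys.length : Int) 1).foldl
          (fun (st : List Int × Int) i =>
            if i == 0 || (decide (i > 0) &&
                (PySem.List.pyGetD ys i 0 != PySem.List.pyGetD ys (i - 1) 0)) then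
              (st.1 ++ [PySem.List.pyGetD ys i 0], st.2 + 1)
            else st)
          ([], 0) := by
      apply PySem.List.foldl_congr_mem
      intro st i hi
      obtain ⟨hi0, hilt⟩ := (PySem.List.mem_pyRange_one).mp hi
      have hget : PySem.List.pyGetD (ys ++ [z]) i 0 = PySem.List.pyGetD ys i 0 := by
        rw [PySem.List.pyGetD_eq_getElem (ys ++ [z]) 0 hi0 (by simp; omega),
            PySem.List.pyGetD_eq_getElem ys 0 hi0 hilt]
        exact List.getElem_append_left (by omega)
      by_cases h0 : i = 0
      · subst h0; simp [hget]
      · have hget' : PySem.List.pyGetD (ys ++ [z]) (i - 1) 0 = PySem.List.pyGetD ys (i - 1) 0 := by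
          rw [PySem.List.pyGetD_eq_getElem (ys ++ [z]) 0 (by omega) (by simp; omega),
              PySem.List.pyGetD_eq_getElem ys 0 (by omega) (by omega)]
          exact List.getElem_append_left (by omega)
        rw [hget, hget']
    have hzget : PySem.List.pyGetD (ys ++ [z]) (ys.length : Int) 0 = z := by
      rw [PySem.List.pyGetD_eq_getElem (ys ++ [z]) 0 (by positivity) (by simp)]
      simp
    have hlastget :
        PySem.List.pyGetD (ys ++ [z]) ((ys.length : Int) - 1) 0 = ys.getLast hys := by
      rw [PySem.List.pyGetD_eq_getElem (ys ++ [z]) 0 (by omega) (by simp)]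
      have htn : (((ys.length : Int)) - 1).toNat = ys.length - 1 := by omega
      rw [List.getElem_append_left (by omega), List.getLast_eq_getElem]
      simp [htn]
    have hne0 : (((ys.length : Int)) == 0) = false := by
      simp; omega
    have hpos' : decide (((ys.length : Int)) > 0) = true := by
      simp; omega
    unfold topic_sift
    rw [hsplit, List.foldl_append, hcongr]
    have ihfold :
        (PySem.List.pyRange 0 (ys.length : Int) 1).foldl
          (fun (st : List Int × Int) i =>
            if i == 0 || (decide (i > 0) &&
                (PySem.List.pyGetD ys i 0 != PySem.List.pyGetD ys (i - 1) 0)) then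
              (st.1 ++ [PySem.List.pyGetD ys i 0], st.2 + 1)
            else st)
          ([], 0) = (pvCollapse ys, ((pvCollapse ys).length : Int)) := by
      simpa [topic_sift] using ih
    rw [ihfold]
    simp only [List.foldl_cons, List.foldl_nil, hne0, hpos', hzget, hlastget,
      Bool.false_or, Bool.true_and, bne_iff_ne]
    rw [pvCollapse_append ys z hys]
    by_cases hzc : z = ys.getLast hys <;> simp [hzc]

theorem pvCollapse_ne_nil (xs : List Int) (h : xs ≠ []) : pvCollapse xs ≠ [] := by
  induction xs with
  | nil => exact absurd rfl h
  | cons a t ih =>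
    cases t with
    | nil => simp [pvCollapse]
    | cons b r =>
      have := ih (by simp)
      simp only [pvCollapse]
      split_ifs with hab
      · exact this
      · simp

theorem pvCollapse_head? (xs : List Int) : (pvCollapse xs).head? = xs.head? := by
  induction xs with
  | nil => rfl
  | cons a t ih =>
    cases t with
    | nil => rfl
    | cons b r =>
      simp only [pvCollapse]
      split_ifs with hab
      · subst hab; rw [ih]; rfl
      · rfl

theorem pvGetLast?_cons_ne (a : Int) (M : List Int) (hM : M ≠ []) :
    (a :: M).getLast? = M.getLast? := by
  cases M with
  | nil => exact absurd rfl hM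
  | cons b t => exact List.getLast?_cons_cons

theorem pvMerge_cons (a : Int) (M R : List Int) (hM : M ≠ []) :
    pvMerge (a :: M) R = a :: pvMerge M R := by
  unfold pvMerge
  rw [pvGetLast?_cons_ne a M hM]
  cases hL : M.getLast? with
  | none => simp [List.getLast?_eq_none_iff] at hL; exact absurd hL hM
  | some x =>
    cases R with
    | nil => simp
    | cons b r => simp only [List.head?_cons]; split_ifs <;> simp

theorem pvCollapse_eq_merge (ys zs : List Int) :
    pvCollapse (ys ++ zs) = pvMerge (pvCollapse ys) (pvCollapse zs) := by
  induction ys with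
  | nil => simp [pvCollapse, pvMerge]
  | cons a t ih =>
    cases t with
    | nil =>
      cases zs with
      | nil => simp [pvCollapse, pvMerge]
      | cons b r =>
        have hne : (b :: r) ≠ [] := by simp
        have hhd : (pvCollapse (b :: r)).head? = some b := by
          rw [pvCollapse_head?]; rfl
        simp only [List.singleton_append, pvCollapse, pvMerge, List.getLast?_singleton, hhd]
        split_ifs with hab
        · obtain ⟨u, v, hv⟩ := List.exists_cons_of_ne_nil (pvCollapse_ne_nil (b :: r) hne)
          have hub : u = b := by
            have hh := pvCollapse_head? (b :: r)
            rw [hv] at hh; simpa using hh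
          simp [hv, hub, hab]
        · rfl
    | cons b r =>
      have hne : pvCollapse (b :: r) ≠ [] := pvCollapse_ne_nil _ (by simp)
      simp only [List.cons_append, pvCollapse]
      split_ifs with hab
      · simpa [List.cons_append] using ih
      · rw [pvMerge_cons a _ _ hne]
        simpa [List.cons_append] using congrArg (a :: ·) ih

theorem pvDC_eq_collapse (xs : List Int) : pvDC xs = pvCollapse xs := by
  induction hn : xs.length using Nat.strong_induction_on generalizing xs with
  | _ n ih =>
    subst hn
    unfold pvDC
    split_ifs with h
    · match xs, h with
      | [], _ => rfl
      | [a], _ => rfl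
    · have h2 : 2 ≤ xs.length := by omega
      have hm : xs.length / 2 < xs.length := by omega
      have hm1 : 1 ≤ xs.length / 2 := by omega
      rw [ih _ (by simp only [List.length_take]; omega) _ rfl,
          ih _ (by simp only [List.length_drop]; omega) _ rfl,
          ← pvCollapse_eq_merge, List.take_append_drop]

-- ===== VERDICT (by name: the statement is the Claim_ definition above) =====
theorem topic_sift_spec : Claim_equal_topic_sift := by
  intro labels _
  unfold Spec_topic_sift topic_sift_alt
  rw [topic_sift_eq_collapse, pvDC_eq_collapse]
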